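-- pv_equiv track=rewrite | github.com/kevinvlad03/BioInformatics | Labs/L8_Project/L8_Project.py | detect_transposons
-- ===== SOURCE A (Python) =====
-- def find_all_occurrences(sequence: str, pattern: str):
--     results = []
--     start = 0
--     while True:
--         idx = sequence.find(pattern, start)
--         if idx == -1:
--             break
--         results.append((idx, idx + len(pattern) - 1))
--         start = idx + 1
--     return results
--
-- def detect_transposons(sequence: str, patterns):
--     detections = []
--     for te in patterns:
--         positions = find_all_occurrences(sequence, te)
--         for (s, e) in positions:
--             detections.append((te, s, e))
--     detections.sort(key=lambda x: x[1])
--     return detections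
-- ===== SOURCE B (Python) =====
-- def detect_transposons(sequence, patterns):
--     n = len(sequence)
--     detections = []
--     for i in range(n + 1):
--         for te in patterns:
--             if sequence[i:i + len(te)] == te:
--                 detections.append((te, i, i + len(te) - 1))
--     return detections
-- ===== Notes on version B (the rewrite author's own statement) =====
-- stated objective: alternative
-- what changed: B replaces A's per-pattern repeated str.find scans followed by a stable sort with a single left-to-right position scan that tries every pattern at each position, emitting matches already in (start, pattern-list) order with no sort.
import Mathlib
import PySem

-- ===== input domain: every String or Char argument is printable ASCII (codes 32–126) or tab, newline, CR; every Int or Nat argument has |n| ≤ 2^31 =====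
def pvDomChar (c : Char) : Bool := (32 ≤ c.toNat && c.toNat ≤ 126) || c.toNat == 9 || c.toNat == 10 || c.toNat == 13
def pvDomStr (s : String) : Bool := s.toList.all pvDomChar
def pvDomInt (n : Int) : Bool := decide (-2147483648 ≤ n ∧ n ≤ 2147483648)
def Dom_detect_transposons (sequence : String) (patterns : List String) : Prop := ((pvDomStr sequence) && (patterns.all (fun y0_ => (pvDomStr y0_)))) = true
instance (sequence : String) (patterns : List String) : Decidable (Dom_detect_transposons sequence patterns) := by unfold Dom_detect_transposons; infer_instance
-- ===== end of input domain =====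

-- B replaces A's per-pattern repeated str.find scans plus a final sort by a single left-to-right
-- position scan that emits matches already in order (no sort); same return value, alternative algorithm.

-- ===== PORT A =====

-- A's 'while True' loop in find_all_occurrences: 'start' only ever moves right, so the loop
-- terminates; this lemma justifies the decreasing measure below.
theorem pvFindFrom_bounds (sequence pattern : String) (start : Nat)
    (h : PySem.Str.findFrom sequence pattern (start : Int) none ≠ -1) :
    start ≤ sequence.toList.length ∧
    (start : Int) ≤ PySem.Str.findFrom sequence pattern (start : Int) none ∧
    (PySem.Str.findFrom sequence pattern (start : Int) none).toNat ≤ sequence.toList.length := by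
  rw [PySem.Str.findFrom_eq] at *
  have hk : start ≤ sequence.toList.length := by
    by_contra hgt
    apply h
    have h0 : ¬((start : Int) < 0) := by omega
    have h1 : (sequence.toList.length : Int) < (start : Int) := by exact_mod_cast Nat.lt_of_not_le hgt
    simp only [PySem.Chars.findFrom, h0, if_false, h1, if_pos]
  refine ⟨hk, ?_, ?_⟩
  · exact (PySem.Chars.findFrom_natCast_spec sequence.toList pattern.toList start hk h).1
  · rw [PySem.Chars.findFrom_natCast sequence.toList pattern.toList start hk] at *
    split at h
    · exact absurd rfl h
    · have hfind : PySem.Chars.find (sequence.toList.drop start) pattern.toList ≤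
          ((sequence.toList.drop start).length : Int) :=
        PySem.Chars.find_le_length _ _
      simp only [List.length_drop] at hfind
      omega

-- transliteration of find_all_occurrences' while-loop: 'start' begins at 0 and is set to idx+1
-- (idx ≥ start ≥ 0, so it stays a Nat)
def faoAux (sequence pattern : String) (start : Nat) : List (Int × Int) :=
  let idx := PySem.Str.findFrom sequence pattern (start : Int) none
  if h : idx = -1 then []
  else (idx, idx + PySem.Str.len pattern - 1) :: faoAux sequence pattern (idx.toNat + 1)
termination_by sequence.toList.length + 1 - start
decreasing_by
  have := pvFindFrom_bounds sequence pattern start h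
  omega

def find_all_occurrences (sequence pattern : String) : List (Int × Int) :=
  faoAux sequence pattern 0

def detect_transposons (sequence : String) (patterns : List String) : List (String × Int × Int) :=
  let detections := patterns.foldl (fun acc te =>
    (find_all_occurrences sequence te).foldl (fun acc2 se => acc2 ++ [(te, se.1, se.2)]) acc) []
  PySem.List.sorted detections (fun x => x.2.1) false

-- ===== PORT B =====

def detect_transposons_alt (sequence : String) (patterns : List String) : List (String × Int × Int) :=
  let n := PySem.Str.len sequence
  (PySem.List.pyRange 0 (n + 1) 1).foldl (fun acc i =>
    patterns.foldl (fun acc2 te =>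
      if PySem.Str.slice sequence (some i) (some (i + PySem.Str.len te)) = te
      then acc2 ++ [(te, i, i + PySem.Str.len te - 1)] else acc2) acc) []

-- ===== PRECONDITION & SPEC =====
def Spec_detect_transposons (sequence : String) (patterns : List String) (out : List (String × Int × Int)) : Prop := out = detect_transposons_alt sequence patterns
instance (sequence : String) (patterns : List String) (out : List (String × Int × Int)) : Decidable (Spec_detect_transposons sequence patterns out) := by unfold Spec_detect_transposons; infer_instance

-- ===== CLAIM (what is proved, stated in full; the proofs are below) =====
def Claim_equal_detect_transposons : Prop := ∀ (sequence : String) (patterns : List String), Dom_detect_transposons sequence patterns → Spec_detect_transposons sequence patterns (detect_transposons sequence patterns)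

-- ===== LEMMAS AND PROOFS =====

-- the common canonical form both ports are reduced to: positions left to right, patterns in list order
def pvCanon (sequence : String) (patterns : List String) : List (String × Int × Int) :=
  (List.range (sequence.toList.length + 1)).flatMap (fun (i : Nat) =>
    (patterns.filter (fun te => te.toList.isPrefixOf (sequence.toList.drop i))).map
      (fun te => (te, (i : Int), (i : Int) + te.toList.length - 1)))

-- ---- generic stable-sort-as-grouping machinery ----

theorem pvInsertBy_all_before {α : Type} (before : α → α → Bool) (x : α) (r : List α)
    (h : ∀ y ∈ r, before x y = true) :
    PySem.List.insertBy before x r = x :: r := by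
  cases r with
  | nil => simp [PySem.List.insertBy]
  | cons y ys => simp [PySem.List.insertBy, h y (by simp)]

theorem pvInsertBy_append_left {α : Type} (before : α → α → Bool) (x : α) (l r : List α)
    (h : ∀ y ∈ l, before x y = false) :
    PySem.List.insertBy before x (l ++ r) = l ++ PySem.List.insertBy before x r := by
  induction l with
  | nil => simp
  | cons y ys ih =>
    simp only [List.cons_append, PySem.List.insertBy, h y (by simp)]
    simp only [ih (fun z hz => h z (by simp [hz])), Bool.false_eq_true, if_false]

theorem pvInsert_groups {α : Type} (key : α → Int) (x : α) (ks : List Int) (g : Int → List α)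
    (hks : ks.Pairwise (· < ·)) (hg : ∀ k ∈ ks, ∀ y ∈ g k, key y = k) (hk : key x ∈ ks) :
    PySem.List.insertBy (fun a b => decide (key a < key b)) x (ks.flatMap g) =
      ks.flatMap (fun k => g k ++ if key x = k then [x] else []) := by
  induction ks with
  | nil => simp at hk
  | cons k ks' ih =>
    rw [List.flatMap_cons, List.flatMap_cons]
    by_cases hxk : key x = k
    · have hl : ∀ y ∈ g k, (decide (key x < key y)) = false := by
        intro y hy
        have := hg k (by simp) y hy
        simp [this, hxk]
      have hr : ∀ y ∈ ks'.flatMap g, (decide (key x < key y)) = true := by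
        intro y hy
        obtain ⟨k', hk', hy'⟩ := List.mem_flatMap.mp hy
        have hky := hg k' (by simp [hk']) y hy'
        have : k < k' := (List.pairwise_cons.mp hks).1 k' hk'
        simp [hky, hxk]; omega
      rw [pvInsertBy_append_left _ _ _ _ hl, pvInsertBy_all_before _ _ _ hr]
      have htail : ks'.flatMap (fun k' => g k' ++ if key x = k' then [x] else []) = ks'.flatMap g := by
        apply List.flatMap_congr
        intro k' hk'
        have : k < k' := (List.pairwise_cons.mp hks).1 k' hk'
        have : ¬ (key x = k') := by omega
        simp [this]
      rw [htail, if_pos hxk]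
      simp
    · have hk' : key x ∈ ks' := by
        rcases List.mem_cons.mp hk with h | h
        · exact absurd h hxk
        · exact h
      have hl : ∀ y ∈ g k, (decide (key x < key y)) = false := by
        intro y hy
        have hy' := hg k (by simp) y hy
        have : k < key x := (List.pairwise_cons.mp hks).1 _ hk'
        simp [hy']; omega
      rw [pvInsertBy_append_left _ _ _ _ hl,
        ih (List.pairwise_cons.mp hks).2 (fun k hkm => hg k (by simp [hkm])) hk', if_neg hxk]
      simp

theorem pvStable_sort_groups {α : Type} (key : α → Int) (xs : List α) (ks : List Int)
    (hks : ks.Pairwise (· < ·)) (hcov : ∀ x ∈ xs, key x ∈ ks) :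
    PySem.List.sorted xs key false = ks.flatMap (fun k => xs.filter (fun x => decide (key x = k))) := by
  induction xs using List.reverseRecOn with
  | nil => simp [PySem.List.sorted_eq_foldl_insertBy]
  | append_singleton ys x ih =>
    rw [PySem.List.sorted_eq_foldl_insertBy, List.foldl_append, List.foldl_cons, List.foldl_nil,
      ← PySem.List.sorted_eq_foldl_insertBy,
      ih (fun y hy => hcov y (by simp [hy])),
      pvInsert_groups key x ks _ hks
        (fun k _ y hy => by simpa using (List.mem_filter.mp hy).2)
        (hcov x (by simp))]
    apply List.flatMap_congr
    intro k _
    rw [List.filter_append]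
    congr 1
    by_cases hxk : key x = k <;> simp [hxk]

theorem pvFilter_range_single (M i : Nat) (P : Nat → Bool) (hi : i < M) :
    (List.range M).filter (fun j => decide (j = i) && P j) = if P i then [i] else [] := by
  induction M with
  | zero => omega
  | succ M ihM =>
    rw [List.range_succ, List.filter_append]
    by_cases hiM : i < M
    · rw [ihM hiM]
      have h2 : (List.filter (fun j => decide (j = i) && P j) [M]) = [] := by
        simp only [List.filter_cons, List.filter_nil]
        have : ¬ (M = i) := by omega
        simp [this]
      rw [h2, List.append_nil]
    · have hieq : i = M := by omega
      subst hieq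
      have h1 : (List.range i).filter (fun j => decide (j = i) && P j) = [] := by
        rw [List.filter_eq_nil_iff]
        intro j hj
        rw [List.mem_range] at hj
        have : ¬ (j = i) := by omega
        simp [this]
      rw [h1, List.nil_append]
      by_cases hP : P i = true <;> simp [hP]

theorem pvFlatMap_ite {α β : Type} (l : List α) (p : α → Bool) (f : α → β) :
    l.flatMap (fun a => if p a then [f a] else []) = (l.filter p).map f := by
  induction l with
  | nil => rfl
  | cons a l ih =>
    rw [List.flatMap_cons, List.filter_cons, ih]
    by_cases h : p a <;> simp [h]

-- ---- A side ----

theorem pvFaoAux_eq (sequence pattern : String) (start : Nat) :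
    faoAux sequence pattern start =
      ((List.range' start (sequence.toList.length + 1 - start)).filter
          (fun (i : Nat) => pattern.toList.isPrefixOf (sequence.toList.drop i))).map
        (fun (i : Nat) => ((i : Int), (i : Int) + pattern.toList.length - 1)) := by
  induction start using faoAux.induct sequence pattern with
  | case1 start idx hidx =>
    replace hidx : PySem.Str.findFrom sequence pattern (start : Int) none = -1 := hidx
    rw [faoAux]
    rw [dif_pos hidx]
    by_cases hk : start ≤ sequence.toList.length
    · have hninf : ¬ pattern.toList <:+: sequence.toList.drop start := by
        rw [PySem.Str.findFrom_eq] at hidx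
        exact (PySem.Chars.findFrom_natCast_eq_neg_one_iff sequence.toList pattern.toList start hk).mp hidx
      have : ((List.range' start (sequence.toList.length + 1 - start)).filter
          (fun (i : Nat) => pattern.toList.isPrefixOf (sequence.toList.drop i))) = [] := by
        rw [List.filter_eq_nil_iff]
        intro i hi
        rw [List.mem_range'_1] at hi
        simp only [List.isPrefixOf_iff_prefix]
        intro hpre
        apply hninf
        have hdrop : sequence.toList.drop i = (sequence.toList.drop start).drop (i - start) := by
          rw [List.drop_drop]; congr 1; omega
        rw [hdrop] at hpre
        exact hpre.isInfix.trans (List.drop_suffix _ _).isInfix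
      rw [this, List.map_nil]
    · have : sequence.toList.length + 1 - start = 0 := by omega
      rw [this]
      simp
  | case2 start idx hidx ih =>
    replace hidx : ¬ PySem.Str.findFrom sequence pattern (start : Int) none = -1 := hidx
    replace ih : faoAux sequence pattern ((PySem.Str.findFrom sequence pattern (start : Int) none).toNat + 1) =
      ((List.range' ((PySem.Str.findFrom sequence pattern (start : Int) none).toNat + 1)
          (sequence.toList.length + 1 - ((PySem.Str.findFrom sequence pattern (start : Int) none).toNat + 1))).filter
          (fun (i : Nat) => pattern.toList.isPrefixOf (sequence.toList.drop i))).map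
        (fun (i : Nat) => ((i : Int), (i : Int) + pattern.toList.length - 1)) := ih
    rw [faoAux]
    rw [dif_neg hidx]
    obtain ⟨hk, hle, hnle⟩ := pvFindFrom_bounds sequence pattern start hidx
    rw [PySem.Str.findFrom_eq] at hle hnle hidx ih ⊢
    set t := sequence.toList with ht
    set j := PySem.Chars.findFrom t pattern.toList (start : Int) none with hjdef
    have hspec := PySem.Chars.findFrom_natCast_spec t pattern.toList start hk hidx
    rw [← hjdef] at hspec
    have hjnn : (0:Int) ≤ j := le_trans (by positivity) hle
    have hsplit : List.range' start (t.length + 1 - start) =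
        List.range' start (j.toNat - start) ++ List.range' j.toNat (t.length + 1 - j.toNat) := by
      have h1 : start + 1 * (j.toNat - start) = j.toNat := by omega
      have h2 : (j.toNat - start) + (t.length + 1 - j.toNat) = t.length + 1 - start := by omega
      rw [← h2, ← List.range'_append, h1]
    rw [hsplit, List.filter_append]
    have hfilter1 : (List.range' start (j.toNat - start)).filter
        (fun (i : Nat) => pattern.toList.isPrefixOf (t.drop i)) = [] := by
      rw [List.filter_eq_nil_iff]
      intro i hi
      rw [List.mem_range'_1] at hi
      simp only [List.isPrefixOf_iff_prefix]
      exact fun hpre => hspec.2.2 i hi.1 (by omega) hpre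
    rw [hfilter1, List.nil_append]
    have hsucc : t.length + 1 - j.toNat = (t.length - j.toNat) + 1 := by omega
    rw [hsucc, List.range'_succ, List.filter_cons]
    have hpfx : (pattern.toList.isPrefixOf (t.drop j.toNat)) = true := by
      rw [List.isPrefixOf_iff_prefix]
      exact hspec.2.1
    rw [hpfx]
    simp only [if_pos]
    rw [List.map_cons]
    have hcast : ((j.toNat : Nat) : Int) = j := Int.toNat_of_nonneg hjnn
    have hlen : PySem.Str.len pattern = (pattern.toList.length : Int) := PySem.Str.len_eq pattern
    have htail : t.length - j.toNat = t.length + 1 - (j.toNat + 1) := by omega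
    rw [ih, htail, hcast, hlen]

theorem pvA_eq (sequence : String) (patterns : List String) :
    detect_transposons sequence patterns = pvCanon sequence patterns := by
  unfold detect_transposons
  simp only [find_all_occurrences, pvFaoAux_eq, Nat.sub_zero, ← List.range_eq_range',
    PySem.List.foldl_append_singleton_eq_map, PySem.List.foldl_append_eq_flatMap,
    List.nil_append, List.map_map]
  set N := sequence.toList.length with hN
  set dets := patterns.flatMap (fun te =>
    ((List.range (N + 1)).filter (fun (i : Nat) => te.toList.isPrefixOf (sequence.toList.drop i))).map
      ((fun se => (te, se.1, se.2)) ∘ (fun (i : Nat) => ((i : Int), (i : Int) + te.toList.length - 1)))) with hdets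
  have hks : ((List.range (N + 1)).map (fun (i : Nat) => (i : Int))).Pairwise (· < ·) := by
    rw [List.pairwise_map]
    exact List.pairwise_lt_range.imp (by intro a b h; exact_mod_cast h)
  have hcov : ∀ x ∈ dets, x.2.1 ∈ (List.range (N + 1)).map (fun (i : Nat) => (i : Int)) := by
    intro x hx
    rw [hdets, List.mem_flatMap] at hx
    obtain ⟨te, hte, hx⟩ := hx
    rw [List.mem_map] at hx
    obtain ⟨i, hi, rfl⟩ := hx
    exact List.mem_map.mpr ⟨i, List.mem_of_mem_filter hi, rfl⟩
  rw [pvStable_sort_groups (fun x => x.2.1) dets _ hks hcov, List.flatMap_map]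
  unfold pvCanon
  rw [← hN]
  apply List.flatMap_congr
  intro i hi
  rw [List.mem_range] at hi
  rw [hdets, List.filter_flatMap]
  rw [← pvFlatMap_ite patterns (fun te => te.toList.isPrefixOf (List.drop i sequence.toList))
    (fun te => (te, (i : Int), (i : Int) + (te.toList.length : Int) - 1))]
  apply List.flatMap_congr
  intro te _
  rw [List.filter_map, List.filter_filter]
  have hpred : ∀ j ∈ List.range (N + 1),
      (((fun x => decide (x.2.1 = (i : Int))) ∘
        ((fun se => (te, se.1, se.2)) ∘ fun (j : Nat) => ((j : Int), (j : Int) + (te.toList.length : Int) - 1))) j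
        && te.toList.isPrefixOf (List.drop j sequence.toList)) =
      (decide (j = i) && te.toList.isPrefixOf (List.drop j sequence.toList)) := by
    intro j _
    simp [Function.comp, Nat.cast_inj]
  rw [List.filter_congr hpred, pvFilter_range_single (N + 1) i _ hi]
  by_cases hp : te.toList.isPrefixOf (List.drop i sequence.toList) = true <;> simp [hp]

-- ---- B side ----

theorem pvB_eq (sequence : String) (patterns : List String) :
    detect_transposons_alt sequence patterns = pvCanon sequence patterns := by
  simp only [detect_transposons_alt]
  rw [PySem.Str.len_eq]
  have hcast : ((sequence.toList.length : Int) + 1) = ((sequence.toList.length + 1 : Nat) : Int) := by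
    push_cast; ring
  rw [hcast, PySem.List.pyRange_zero_natCast, List.foldl_map]
  have hcond : ∀ (i : Nat) (te : String),
      (PySem.Str.slice sequence (some (i : Int)) (some ((i : Int) + (te.toList.length : Int))) = te) ↔
      (te.toList.isPrefixOf (sequence.toList.drop i) = true) := by
    intro i te
    rw [← String.toList_inj]
    have hsl : (PySem.Str.slice sequence (some (i : Int)) (some ((i : Int) + (te.toList.length : Int)))).toList
        = PySem.List.slice sequence.toList (some (i : Int)) (some ((i : Int) + (te.toList.length : Int))) := by
      simp [PySem.Str.slice]
    rw [hsl, PySem.List.slice_natCast_add, List.isPrefixOf_iff_prefix, List.prefix_iff_eq_take]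
    exact eq_comm
  simp only [PySem.Str.len_eq, hcond]
  simp only [PySem.List.foldl_append_if, PySem.List.foldl_append_eq_flatMap, List.nil_append]
  rfl

-- ===== VERDICT (by name: the statement is the Claim_ definition above) =====
theorem detect_transposons_spec : Claim_equal_detect_transposons := by
  intro sequence patterns _
  unfold Spec_detect_transposons
  rw [pvA_eq, pvB_eq]
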